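-- pv_equiv track=rewrite | github.com/kobanium/TamaGo | mcts/sequential_halving.py | get_sequence_of_considered_visits
-- ===== SOURCE A (Python) =====
-- from typing import Dict, Tuple
-- import math
--
-- def get_sequence_of_considered_visits(max_num_considered_actions: int, \
--     num_simulations: int) -> Tuple[int]:
--     """探索回数に対応する探索回数閾値の列を取得する。
--
--     Args:
--         max_num_considered_actions (int): 探索幅の最大値。
--         num_simulations (int): 1回の思考で実行する探索回数。
--
--     Returns:
--         Tuple[int]: 探索回数閾値の列。
--     """
--     if max_num_considered_actions <= 1:
--         return tuple(range(num_simulations))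
--     log2max = int(math.ceil(math.log2(max_num_considered_actions)))
--     sequence = []
--     visits = [0] * max_num_considered_actions
--     num_considered = max_num_considered_actions
--
--     while len(sequence) < num_simulations:
--         num_extra_visits = max(1, int(num_simulations / (log2max * num_considered)))
--         for _ in range(num_extra_visits):
--             sequence.extend(visits[:num_considered])
--             for i in range(num_considered):
--                 visits[i] += 1
--         num_considered = max(2, num_considered // 2)
--
--     return tuple(sequence[:num_simulations])
-- ===== SOURCE B (Python) =====
-- def get_sequence_of_considered_visits(max_num_considered_actions, num_simulations):
--     if max_num_considered_actions <= 1: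
--         return tuple(range(num_simulations))
--     log2max = (max_num_considered_actions - 1).bit_length()
--     # Pass 1: plan the rounds -- one width entry per round (round r emits that many copies of r).
--     widths = []
--     total = 0
--     num_considered = max_num_considered_actions
--     while total < num_simulations:
--         num_extra_visits = max(1, num_simulations // (log2max * num_considered))
--         widths.extend([num_considered] * num_extra_visits)
--         total += num_extra_visits * num_considered
--         num_considered = max(2, num_considered // 2)
--     # Pass 2: emit -- the counter of round r is simply its index in the plan.
--     sequence = [c for c, w in enumerate(widths) for _ in range(w)]
--     return tuple(sequence[:num_simulations])
-- ===== Notes on version B (the rewrite author's own statement) =====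
-- stated objective: alternative
-- what changed: B is a two-stage plan-then-emit algorithm: a first pass builds only the list of per-round widths (no visits array, no sequence) and tracks the emitted length arithmetically; a second pass materialises the sequence as a comprehension over enumerate(widths), the round index itself being the emitted value; ceil(log2) is computed via integer bit_length instead of float math.
import Mathlib
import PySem

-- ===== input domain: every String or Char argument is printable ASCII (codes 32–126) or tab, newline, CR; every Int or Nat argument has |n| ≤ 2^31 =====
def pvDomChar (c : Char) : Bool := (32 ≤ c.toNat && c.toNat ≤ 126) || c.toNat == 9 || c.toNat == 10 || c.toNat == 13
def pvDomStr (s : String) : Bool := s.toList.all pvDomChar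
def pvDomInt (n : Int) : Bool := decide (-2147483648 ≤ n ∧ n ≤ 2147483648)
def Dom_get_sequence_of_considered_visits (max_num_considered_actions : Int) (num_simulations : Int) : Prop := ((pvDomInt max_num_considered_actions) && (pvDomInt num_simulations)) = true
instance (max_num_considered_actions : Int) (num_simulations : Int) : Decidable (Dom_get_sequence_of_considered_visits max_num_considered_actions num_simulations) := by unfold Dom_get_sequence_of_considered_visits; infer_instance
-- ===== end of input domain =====

-- B replaces A's online loop (visits array sliced into the sequence and incremented entry by
-- entry) with a plan-then-emit pair of passes: first the per-round widths, then one flat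
-- comprehension over enumerate(widths); objective: alternative decomposition.

-- ===== PORT A =====
-- for i in range(num_considered): visits[i] += 1   (structural recursion on the range index)
def pvIncLoop (vs : List Int) (i k : Nat) : List Int :=
  if h : i < k then pvIncLoop (vs.set i (vs.getD i 0 + 1)) (i + 1) k else vs
termination_by k - i

-- for _ in range(num_extra_visits): sequence.extend(visits[:num_considered]); <inc loop>
def pvRoundsA : Nat → List Int → List Int → Int → List Int × List Int
  | 0, seq, vs, _ => (seq, vs)
  | r + 1, seq, vs, nc =>
      pvRoundsA r (seq ++ PySem.List.slice vs none (some nc)) (pvIncLoop vs 0 nc.toNat) nc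

-- while len(sequence) < num_simulations: …   (fuel ≥ number of iterations: each iteration grows
-- the sequence by at least 2, so num_simulations.toNat + 1 iterations always suffice)
def pvLoopA (ns l2m : Int) : Nat → List Int → List Int → Int → List Int
  | 0, seq, _, _ => seq
  | fuel + 1, seq, vs, nc =>
      if (seq.length : Int) < ns then
        -- int(ns / (l2m*nc)): float division then truncation; exact as floor division here since
        -- on the domain 1 ≤ ns ≤ 2^31 < 2^52 and the divisor is positive.
        let nev := max 1 (PySem.Int.floordiv ns (l2m * nc))
        let p := pvRoundsA nev.toNat seq vs nc
        pvLoopA ns l2m fuel p.1 p.2 (max 2 (PySem.Int.floordiv nc 2))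
      else seq

def get_sequence_of_considered_visits (max_num_considered_actions : Int) (num_simulations : Int) : List Int :=
  if max_num_considered_actions ≤ 1 then PySem.List.pyRange 0 num_simulations 1
  else
    -- int(math.ceil(math.log2(m))) = Nat.clog 2 m: exact for 2 ≤ m ≤ 2^31 (log2 of an exactly
    -- representable int is never within double rounding error of a wrong integer side there).
    let l2m : Int := (Nat.clog 2 max_num_considered_actions.toNat : Int)
    PySem.List.slice
      (pvLoopA num_simulations l2m (num_simulations.toNat + 1) []
        (List.replicate max_num_considered_actions.toNat 0) max_num_considered_actions)
      none (some num_simulations)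

-- ===== PORT B =====
-- pass 1: while total < num_simulations: widths.extend([nc]*nev); total += nev*nc; nc = max(2, nc//2)
def pvPhasesB (ns l2m : Int) : Nat → List Int → Int → Int → List Int
  | 0, ws, _, _ => ws
  | fuel + 1, ws, total, nc =>
      if total < ns then
        let nev := max 1 (PySem.Int.floordiv ns (l2m * nc))
        pvPhasesB ns l2m fuel (ws ++ List.replicate nev.toNat nc) (total + nev * nc)
          (max 2 (PySem.Int.floordiv nc 2))
      else ws

-- pass 2: [c for c, w in enumerate(widths) for _ in range(w)]
def pvEmit (ws : List Int) : List Int :=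
  (PySem.List.enumerate ws 0).flatMap (fun cw => List.replicate cw.2.toNat cw.1)

def get_sequence_of_considered_visits_alt (max_num_considered_actions : Int) (num_simulations : Int) : List Int :=
  if max_num_considered_actions ≤ 1 then PySem.List.pyRange 0 num_simulations 1
  else
    let l2m : Int := (PySem.Int.bitLength (max_num_considered_actions - 1) : Int)
    PySem.List.slice
      (pvEmit (pvPhasesB num_simulations l2m (num_simulations.toNat + 1) [] 0 max_num_considered_actions))
      none (some num_simulations)

-- ===== PRECONDITION & SPEC =====
def Spec_get_sequence_of_considered_visits (max_num_considered_actions : Int) (num_simulations : Int) (out : List Int) : Prop := out = get_sequence_of_considered_visits_alt max_num_considered_actions num_simulations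
instance (max_num_considered_actions : Int) (num_simulations : Int) (out : List Int) : Decidable (Spec_get_sequence_of_considered_visits max_num_considered_actions num_simulations out) := by unfold Spec_get_sequence_of_considered_visits; infer_instance

-- ===== CLAIM =====
def Claim_equal_get_sequence_of_considered_visits : Prop := ∀ (max_num_considered_actions : Int) (num_simulations : Int), Dom_get_sequence_of_considered_visits max_num_considered_actions num_simulations → Spec_get_sequence_of_considered_visits max_num_considered_actions num_simulations (get_sequence_of_considered_visits max_num_considered_actions num_simulations)

-- ===== LEMMAS AND PROOFS =====

-- Proof-side middle abstraction: A's loop with the all-equal visits prefix collapsed to a counter.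
def pvRoundsC : Nat → List Int → Int → Int → List Int × Int
  | 0, seq, c, _ => (seq, c)
  | r + 1, seq, c, nc => pvRoundsC r (seq ++ List.replicate nc.toNat c) (c + 1) nc

def pvLoopC (ns l2m : Int) : Nat → List Int → Int → Int → List Int
  | 0, seq, _, _ => seq
  | fuel + 1, seq, c, nc =>
      if (seq.length : Int) < ns then
        let nev := max 1 (PySem.Int.floordiv ns (l2m * nc))
        let p := pvRoundsC nev.toNat seq c nc
        pvLoopC ns l2m fuel p.1 p.2 (max 2 (PySem.Int.floordiv nc 2))
      else seq

-- Proof-side: B's phase loop without the accumulator, and emission from a given counter.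
def pvTail (ns l2m : Int) : Nat → Int → Int → List Int
  | 0, _, _ => []
  | fuel + 1, total, nc =>
      if total < ns then
        let nev := max 1 (PySem.Int.floordiv ns (l2m * nc))
        List.replicate nev.toNat nc ++ pvTail ns l2m fuel (total + nev * nc)
          (max 2 (PySem.Int.floordiv nc 2))
      else []

def pvEmitFrom : Int → List Int → List Int
  | _, [] => []
  | c, w :: ws => List.replicate w.toNat c ++ pvEmitFrom (c + 1) ws

-- ---- step 1: A's loop equals the counter loop ----

lemma pvIncLoop_replicate (c : Int) :
    ∀ (j i : Nat) (rest : List Int),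
      pvIncLoop (List.replicate i (c + 1) ++ (List.replicate j c ++ rest)) i (i + j)
        = List.replicate (i + j) (c + 1) ++ rest := by
  intro j
  induction j with
  | zero => intro i rest; rw [pvIncLoop]; simp
  | succ j ih =>
      intro i rest
      rw [pvIncLoop]
      have hlt : i < i + (j + 1) := by omega
      simp only [hlt, dif_pos]
      simp only [List.replicate_succ, List.cons_append]
      have hget : (List.replicate i (c + 1) ++ c :: (List.replicate j c ++ rest)).getD i 0 = c := by
        rw [List.getD_append_right _ _ _ _ (by simp)]
        simp
      have hset : (List.replicate i (c + 1) ++ c :: (List.replicate j c ++ rest)).set i (c + 1)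
          = List.replicate i (c + 1) ++ (c + 1) :: (List.replicate j c ++ rest) := by
        rw [List.set_append_right _ _ (by simp)]
        simp
      rw [hget, hset]
      have hrep : List.replicate i (c + 1) ++ (c + 1) :: (List.replicate j c ++ rest)
          = List.replicate (i + 1) (c + 1) ++ (List.replicate j c ++ rest) := by
        rw [List.replicate_succ']
        simp
      rw [hrep]
      have harith : i + (j + 1) = (i + 1) + j := by omega
      rw [harith]
      exact ih (i + 1) rest

lemma pvIncLoop_spec (vs : List Int) (k : Nat) (c : Int) (hk : k ≤ vs.length)
    (h : vs.take k = List.replicate k c) :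
    pvIncLoop vs 0 k = List.replicate k (c + 1) ++ vs.drop k := by
  have := pvIncLoop_replicate c k 0 (vs.drop k)
  simp only [List.replicate_zero, List.nil_append, Nat.zero_add] at this
  rw [← this]; congr 1
  conv_lhs => rw [← List.take_append_drop k vs, h]

lemma pvRounds_eq (nc : Int) (hnc : 0 ≤ nc) :
    ∀ (r : Nat) (c : Int) (seq vs : List Int),
      nc.toNat ≤ vs.length → vs.take nc.toNat = List.replicate nc.toNat c →
      (pvRoundsA r seq vs nc).1 = (pvRoundsC r seq c nc).1 ∧
      (pvRoundsA r seq vs nc).2.length = vs.length ∧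
      (pvRoundsA r seq vs nc).2.take nc.toNat = List.replicate nc.toNat ((pvRoundsC r seq c nc).2) := by
  intro r
  induction r with
  | zero => intro c seq vs hlen hpre; exact ⟨rfl, rfl, hpre⟩
  | succ r ih =>
      intro c seq vs hlen hpre
      have hslice : PySem.List.slice vs none (some nc) = List.replicate nc.toNat c := by
        rw [PySem.List.slice_to vs hnc, hpre]
      have hinc := pvIncLoop_spec vs nc.toNat c hlen hpre
      have hlen' : (pvIncLoop vs 0 nc.toNat).length = vs.length := by
        rw [hinc]; simp; omega
      have hpre' : (pvIncLoop vs 0 nc.toNat).take nc.toNat = List.replicate nc.toNat (c + 1) := by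
        rw [hinc]; simp
      have := ih (c + 1) (seq ++ List.replicate nc.toNat c) (pvIncLoop vs 0 nc.toNat)
        (by omega) hpre'
      simp only [pvRoundsA, pvRoundsC, hslice]
      exact ⟨this.1, by rw [this.2.1, hlen'], this.2.2⟩

lemma pvLoop_eq (ns l2m : Int) :
    ∀ (fuel : Nat) (seq vs : List Int) (c nc : Int),
      2 ≤ nc → nc.toNat ≤ vs.length → vs.take nc.toNat = List.replicate nc.toNat c →
      pvLoopA ns l2m fuel seq vs nc = pvLoopC ns l2m fuel seq c nc := by
  intro fuel
  induction fuel with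
  | zero => intro seq vs c nc _ _ _; rfl
  | succ fuel ih =>
      intro seq vs c nc hnc hlen hpre
      rw [pvLoopA, pvLoopC]
      by_cases hcond : (seq.length : Int) < ns
      · simp only [hcond, if_pos]
        have h0 : (0:Int) ≤ nc := by omega
        obtain ⟨h1, h2, h3⟩ := pvRounds_eq nc h0
          (max 1 (PySem.Int.floordiv ns (l2m * nc))).toNat c seq vs hlen hpre
        rw [h1]
        set r := (max 1 (PySem.Int.floordiv ns (l2m * nc))).toNat
        have hfd : PySem.Int.floordiv nc 2 = nc / 2 :=
          PySem.Int.floordiv_eq_ediv_of_pos (by omega)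
        have hle : max 2 (PySem.Int.floordiv nc 2) ≤ nc := by rw [hfd]; omega
        have hnc' : (2:Int) ≤ max 2 (PySem.Int.floordiv nc 2) := le_max_left _ _
        apply ih
        · exact hnc'
        · rw [h2]; omega
        · have hstep : List.take (max 2 (PySem.Int.floordiv nc 2)).toNat ((pvRoundsA r seq vs nc).2)
              = List.take (max 2 (PySem.Int.floordiv nc 2)).toNat
                  (List.take nc.toNat ((pvRoundsA r seq vs nc).2)) := by
            rw [List.take_take]; congr 1; omega
          rw [hstep, h3, List.take_replicate]; congr 1; omega
      · simp only [hcond, if_false]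

-- ---- step 2: the counter loop equals emit-of-plan ----

lemma pvEmitFrom_append (c : Int) (ws1 ws2 : List Int) :
    pvEmitFrom c (ws1 ++ ws2) = pvEmitFrom c ws1 ++ pvEmitFrom (c + ws1.length) ws2 := by
  induction ws1 generalizing c with
  | nil => simp [pvEmitFrom]
  | cons w ws ih =>
      simp only [List.cons_append, pvEmitFrom, ih (c + 1), List.append_assoc, List.length_cons]
      congr 3
      push_cast; ring

lemma pvRoundsC_spec (nc : Int) (r : Nat) :
    ∀ (seq : List Int) (c : Int),
      pvRoundsC r seq c nc = (seq ++ pvEmitFrom c (List.replicate r nc), c + r) := by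
  induction r with
  | zero => intro seq c; simp [pvRoundsC, pvEmitFrom]
  | succ r ih =>
      intro seq c
      rw [List.replicate_succ]
      simp only [pvRoundsC, pvEmitFrom, ih, List.append_assoc]
      have : c + 1 + (r : Int) = c + ((r : Int) + 1) := by ring
      simp [this]

lemma pvEmitFrom_replicate_length (c nc : Int) (r : Nat) :
    (pvEmitFrom c (List.replicate r nc)).length = r * nc.toNat := by
  induction r generalizing c with
  | zero => simp [pvEmitFrom]
  | succ r ih => rw [List.replicate_succ]; simp [pvEmitFrom, ih]; ring

lemma pvLoopC_eq_tail (ns l2m : Int) :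
    ∀ (fuel : Nat) (seq : List Int) (c nc : Int), 0 ≤ nc →
      pvLoopC ns l2m fuel seq c nc = seq ++ pvEmitFrom c (pvTail ns l2m fuel (seq.length) nc) := by
  intro fuel
  induction fuel with
  | zero => intro seq c nc _; simp [pvLoopC, pvTail, pvEmitFrom]
  | succ fuel ih =>
      intro seq c nc hnc
      rw [pvLoopC, pvTail]
      by_cases hcond : (seq.length : Int) < ns
      · simp only [hcond, if_pos]
        set nev := max 1 (PySem.Int.floordiv ns (l2m * nc)) with hnev
        have hnev0 : 0 ≤ nev := le_trans (by norm_num) (le_max_left _ _)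
        rw [pvRoundsC_spec]
        have hlen : (pvEmitFrom c (List.replicate nev.toNat nc)).length = nev.toNat * nc.toNat :=
          pvEmitFrom_replicate_length c nc nev.toNat
        have hL : (((seq ++ pvEmitFrom c (List.replicate nev.toNat nc)).length : Nat) : Int)
            = (seq.length : Int) + nev * nc := by
          simp [hlen]
          rw [max_eq_left hnev0, max_eq_left hnc]
        rw [ih _ _ _ (le_trans (by norm_num) (le_max_left 2 _)), hL, pvEmitFrom_append,
          List.length_replicate, List.append_assoc]
      · simp only [hcond, if_false]; simp [pvEmitFrom]

lemma pvPhasesB_acc (ns l2m : Int) :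
    ∀ (fuel : Nat) (ws : List Int) (total nc : Int),
      pvPhasesB ns l2m fuel ws total nc = ws ++ pvTail ns l2m fuel total nc := by
  intro fuel
  induction fuel with
  | zero => intro ws total nc; simp [pvPhasesB, pvTail]
  | succ fuel ih =>
      intro ws total nc
      rw [pvPhasesB, pvTail]
      by_cases hcond : total < ns
      · simp only [hcond, if_pos]; rw [ih]; simp [List.append_assoc]
      · simp only [hcond, if_false]; simp

lemma pvEmit_eq_emitFrom : ∀ (ws : List Int) (c : Int),
    (PySem.List.enumerate ws c).flatMap (fun cw => List.replicate cw.2.toNat cw.1)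
      = pvEmitFrom c ws := by
  intro ws
  induction ws with
  | nil => intro c; simp [PySem.List.enumerate_nil, pvEmitFrom]
  | cons w ws ih => intro c; rw [PySem.List.enumerate_cons]; simp [pvEmitFrom, ih]

-- ceil(log2 m) = bit_length(m-1) for m ≥ 2
lemma clog_eq_bitLength (m : Int) (hm : 2 ≤ m) :
    Nat.clog 2 m.toNat = PySem.Int.bitLength (m - 1) := by
  set k := PySem.Int.bitLength (m - 1) with hk
  have hne : m - 1 ≠ 0 := by omega
  have h1 := PySem.Int.two_pow_bitLength_le (m - 1) hne
  have h2 := PySem.Int.lt_two_pow_bitLength (m - 1)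
  rw [← hk] at h1 h2
  have habs : (m - 1).natAbs = m.toNat - 1 := by omega
  rw [habs] at h1 h2
  apply le_antisymm
  · rw [Nat.clog_le_iff_le_pow (by norm_num)]
    omega
  · rcases Nat.eq_zero_or_pos k with h0 | hpos
    · omega
    · have hlt : 2 ^ (k - 1) < m.toNat := by omega
      have := (Nat.lt_clog_iff_pow_lt (by norm_num)).2 hlt
      omega

-- ===== VERDICT =====
theorem get_sequence_of_considered_visits_spec : Claim_equal_get_sequence_of_considered_visits := by
  intro m ns _
  unfold Spec_get_sequence_of_considered_visits
  unfold get_sequence_of_considered_visits get_sequence_of_considered_visits_alt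
  by_cases hm : m ≤ 1
  · simp [hm]
  · simp only [hm, if_false]
    have hm2 : 2 ≤ m := by omega
    rw [clog_eq_bitLength m hm2]
    congr 1
    rw [pvLoop_eq ns _ _ [] (List.replicate m.toNat 0) 0 m hm2 (by simp) (by simp)]
    rw [pvLoopC_eq_tail ns _ _ [] 0 m (by omega)]
    rw [pvPhasesB_acc]
    unfold pvEmit
    rw [pvEmit_eq_emitFrom]
    simp
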